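-- pv_equiv track=rewrite | github.com/akhandsingh17/assignments | codingexercise/MaxDiffBetween2SubsetsOfMElements.py | MaxDiffBetween2SubsetsOfMElements
-- ===== SOURCE A (Python) =====
-- def MaxDiffBetween2SubsetsOfMElements(ary,m):
--
--     left=0
--     right=len(ary)-1
--     ary.sort()
--
--     j=0
--     min_sum=0
--     max_sum=0
--     while j<m:
--
--         min_sum=min_sum+ary[left]
--         max_sum=max_sum+ary[right]
--         j=j+1
--         left=left+1
--         right=right-1
--
--     return max_sum-min_sum
-- ===== SOURCE B (Python) =====
-- def _kth(xs, k):
--     # value at index k of sorted(xs) (0-based), by quickselect partitioning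
--     pivot = xs[len(xs) // 2]
--     lt = [x for x in xs if x < pivot]
--     eq_count = len([x for x in xs if x == pivot])
--     if k < len(lt):
--         return _kth(lt, k)
--     if k < len(lt) + eq_count:
--         return pivot
--     return _kth([x for x in xs if x > pivot], k - len(lt) - eq_count)
--
--
-- def MaxDiffBetween2SubsetsOfMElements(ary, m):
--     # quickselect the two threshold values, then sum around them; never sorts
--     # (and, unlike A, does not mutate ary)
--     if m <= 0:
--         return 0
--     n = len(ary)
--     lo_t = _kth(ary, m - 1)      # m-th smallest value
--     hi_t = _kth(ary, n - m)      # m-th largest value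
--     below = [x for x in ary if x < lo_t]
--     above = [x for x in ary if x > hi_t]
--     min_sum = sum(below) + lo_t * (m - len(below))
--     max_sum = sum(above) + hi_t * (m - len(above))
--     return max_sum - min_sum
-- ===== Notes on version B (the rewrite author's own statement) =====
-- stated objective: alternative
-- what changed: Replaces sort-then-two-pointer summation by quickselect: B partitions to find the m-th smallest and m-th largest values and sums around those thresholds, never sorting the list (and, unlike A, not mutating it); asymptotically O(n) average but not measurably faster in practice against Python's C-implemented sort.
import Mathlib
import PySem

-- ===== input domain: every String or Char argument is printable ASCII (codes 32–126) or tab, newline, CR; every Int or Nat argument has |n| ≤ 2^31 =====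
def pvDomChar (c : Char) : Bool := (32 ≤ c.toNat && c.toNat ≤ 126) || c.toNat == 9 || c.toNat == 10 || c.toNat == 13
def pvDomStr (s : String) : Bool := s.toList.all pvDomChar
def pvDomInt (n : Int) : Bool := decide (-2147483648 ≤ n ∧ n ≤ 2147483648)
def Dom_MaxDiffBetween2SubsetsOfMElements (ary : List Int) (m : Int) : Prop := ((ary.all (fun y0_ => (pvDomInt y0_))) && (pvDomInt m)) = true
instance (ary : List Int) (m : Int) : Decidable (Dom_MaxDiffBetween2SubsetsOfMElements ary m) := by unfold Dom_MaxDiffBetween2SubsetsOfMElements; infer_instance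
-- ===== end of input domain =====

-- B replaces A's sort + two-pointer summation loop by quickselect thresholds and sums around
-- them (return-value equivalence only: A sorts ary in place, B leaves it unchanged).


-- ===== PORT A =====
-- A's 'while j < m' loop; ary[left]/ary[right] are in range under Pre_ (m ≤ len ary), so the
-- pyGetD default 0 is never read on admitted inputs (Python raises IndexError outside Pre_).
def pvLoopA (s : List Int) (m j left right min_sum max_sum : Int) : Int :=
  if _h : j < m then
    pvLoopA s m (j + 1) (left + 1) (right - 1)
      (min_sum + PySem.List.pyGetD s left 0)
      (max_sum + PySem.List.pyGetD s right 0)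
  else
    max_sum - min_sum
termination_by (m - j).toNat
decreasing_by omega

def MaxDiffBetween2SubsetsOfMElements (ary : List Int) (m : Int) : Int :=
  let left : Int := 0
  let right : Int := (ary.length : Int) - 1
  let s := PySem.List.sorted ary (fun x => x) false   -- ary.sort()
  pvLoopA s m 0 left right 0 0

-- ===== PORT B =====
-- termination helper for pvKth's recursion: filtering out a present non-matching element shrinks
theorem pv_filter_length_lt (p : Int → Bool) (xs : List Int) (x : Int)
    (hx : x ∈ xs) (hpx : p x = false) : (xs.filter p).length < xs.length := by
  have hsub : (xs.filter p).Sublist xs := List.filter_sublist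
  rcases Nat.lt_or_ge (xs.filter p).length xs.length with h | h
  · exact h
  · have heq : xs.filter p = xs := hsub.eq_of_length (Nat.le_antisymm hsub.length_le h)
    have hxin : x ∈ xs.filter p := by rw [heq]; exact hx
    simp [List.mem_filter, hpx] at hxin

theorem pv_pivot_mem (xs : List Int) (h : xs ≠ []) : xs.getD (xs.length / 2) 0 ∈ xs := by
  have hlen : 0 < xs.length := List.length_pos_of_ne_nil h
  rw [List.getD_eq_getElem _ _ (by omega)]
  exact List.getElem_mem _

-- quickselect: value at index k of sorted(xs) (0-based); Python raises IndexError on empty xs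
-- (unreachable under Pre_, where the [] branch's 0 is never produced).
def pvKth (xs : List Int) (k : Int) : Int :=
  match xs with
  | [] => 0
  | a :: t =>
    let xs' := a :: t
    let p := xs'.getD (xs'.length / 2) 0    -- pivot = xs[len(xs)//2], in range since xs ≠ []
    let lt := xs'.filter (fun x => x < p)
    let eqc := (xs'.filter (fun x => x == p)).length
    if k < (lt.length : Int) then
      pvKth lt k
    else if k < (lt.length : Int) + (eqc : Int) then p
    else pvKth (xs'.filter (fun x => p < x)) (k - lt.length - eqc)
termination_by xs.length
decreasing_by
  · exact pv_filter_length_lt _ _ _ (pv_pivot_mem (a :: t) (by simp)) (by simp)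
  · exact pv_filter_length_lt _ _ _ (pv_pivot_mem (a :: t) (by simp)) (by simp)

def MaxDiffBetween2SubsetsOfMElements_alt (ary : List Int) (m : Int) : Int :=
  if m ≤ 0 then 0
  else
    let n : Int := ary.length
    let lo_t := pvKth ary (m - 1)         -- m-th smallest value
    let hi_t := pvKth ary (n - m)         -- m-th largest value
    let below := ary.filter (fun x => x < lo_t)
    let above := ary.filter (fun x => hi_t < x)
    let min_sum := below.sum + lo_t * (m - below.length)
    let max_sum := above.sum + hi_t * (m - above.length)
    max_sum - min_sum

-- ===== PRECONDITION & SPEC =====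
-- Pre_: exactly the inputs on which A returns (for m > len(ary) A's loop reaches ary[left]
-- with left = len(ary) and Python raises IndexError).
def Pre_MaxDiffBetween2SubsetsOfMElements (ary : List Int) (m : Int) : Prop :=
  m ≤ (ary.length : Int)
instance (ary : List Int) (m : Int) : Decidable (Pre_MaxDiffBetween2SubsetsOfMElements ary m) := by unfold Pre_MaxDiffBetween2SubsetsOfMElements; infer_instance

def pvWitness_MaxDiffBetween2SubsetsOfMElements : List Int × Int := ([3, 1, 4, 1, 5], 2)

def Spec_MaxDiffBetween2SubsetsOfMElements (ary : List Int) (m : Int) (out : Int) : Prop := out = MaxDiffBetween2SubsetsOfMElements_alt ary m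
instance (ary : List Int) (m : Int) (out : Int) : Decidable (Spec_MaxDiffBetween2SubsetsOfMElements ary m out) := by unfold Spec_MaxDiffBetween2SubsetsOfMElements; infer_instance

-- ===== CLAIM (what is proved, stated in full; the proofs are below) =====
def Claim_equal_MaxDiffBetween2SubsetsOfMElements : Prop := ∀ (ary : List Int) (m : Int), Dom_MaxDiffBetween2SubsetsOfMElements ary m → Pre_MaxDiffBetween2SubsetsOfMElements ary m → Spec_MaxDiffBetween2SubsetsOfMElements ary m (MaxDiffBetween2SubsetsOfMElements ary m)

-- ===== LEMMAS AND PROOFS =====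

theorem pv_sum_filter_split (p : Int → Bool) (l : List Int) :
    (l.filter p).sum + (l.filter (fun x => !p x)).sum = l.sum := by
  induction l with
  | nil => simp
  | cons a t ih => by_cases h : p a <;> simp [h, ← ih] <;> ring

theorem pv_sum_const (l : List Int) (v : Int) (h : ∀ x ∈ l, x = v) :
    l.sum = l.length * v := by
  induction l with
  | nil => simp
  | cons a t ih =>
    simp only [List.sum_cons, List.length_cons, h a (by simp)]
    rw [ih (fun x hx => h x (by simp [hx]))]; push_cast; ring

theorem pv_count_filter_neg (p : Int → Bool) (l : List Int) (b : Int) (hb : p b = false) :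
    (l.filter p).count b = 0 :=
  List.count_eq_zero.mpr (fun hmem => by
    have := (List.mem_filter.mp hmem).2
    rw [hb] at this; exact Bool.false_ne_true this)

-- sortedness gives index monotonicity
theorem pv_mono (s : List Int) (hs : s.Pairwise (· ≤ ·)) (i j : Nat) (hij : i ≤ j)
    (hj : j < s.length) : s[i]'(by omega) ≤ s[j] := by
  rcases Nat.lt_or_ge i j with h | h
  · exact (List.pairwise_iff_getElem.mp hs) i j (by omega) hj h
  · have : i = j := by omega
    subst this; exact le_refl _

-- pvKth xs k is the k-th element of any sorted permutation of xs
theorem pvKth_spec : ∀ (N : Nat) (xs : List Int), xs.length ≤ N → ∀ (k : Int) (s : List Int),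
    s.Perm xs → s.Pairwise (· ≤ ·) → 0 ≤ k → k < (s.length : Int) →
    pvKth xs k = s.getD k.toNat 0 := by
  intro N
  induction N with
  | zero =>
    intro xs hN k s hperm hsort hk0 hk
    have h0 : s.length = 0 := by have := hperm.length_eq; omega
    exact absurd hk (by omega)
  | succ N ih =>
    intro xs hN k s hperm hsort hk0 hk
    have hslen : s.length = xs.length := hperm.length_eq
    match xs with
    | [] =>
      have h0 : s.length = 0 := by simpa using hperm.length_eq
      exact absurd hk (by omega)
    | a :: t =>
      rw [pvKth]
      set xs' : List Int := a :: t with hxs'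
      set p : Int := xs'.getD (xs'.length / 2) 0 with hp
      set lt : List Int := xs'.filter (fun x => x < p) with hlt
      set eqL : List Int := xs'.filter (fun x => x == p) with heqL
      set gt : List Int := xs'.filter (fun x => p < x) with hgt
      set L : List Int := PySem.List.sorted lt (fun x => x) false with hL
      set G : List Int := PySem.List.sorted gt (fun x => x) false with hG
      have hLlen : L.length = lt.length := PySem.List.length_sorted lt (fun x => x) false
      have hGlen : G.length = gt.length := PySem.List.length_sorted gt (fun x => x) false
      have hLperm : L.Perm lt := PySem.List.sorted_perm lt (fun x => x) false
      have hGperm : G.Perm gt := PySem.List.sorted_perm gt (fun x => x) false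
      have hLsort : L.Pairwise (· ≤ ·) := by
        have := PySem.List.sorted_pairwise (xs := lt) (key := fun x : Int => x)
        simpa using this
      have hGsort : G.Pairwise (· ≤ ·) := by
        have := PySem.List.sorted_pairwise (xs := gt) (key := fun x : Int => x)
        simpa using this
      have hmemL : ∀ x ∈ L, x < p := by
        intro x hx
        have hx' : x ∈ xs'.filter (fun x => decide (x < p)) := by
          rw [← hlt]; exact hLperm.mem_iff.mp hx
        exact of_decide_eq_true (List.mem_filter.mp hx').2
      have hmemE : ∀ x ∈ eqL, x = p := by
        intro x hx
        have hx' : x ∈ xs'.filter (fun x => x == p) := by rw [← heqL]; exact hx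
        have := (List.mem_filter.mp hx').2
        simpa using this
      have hmemG : ∀ x ∈ G, p < x := by
        intro x hx
        have hx' : x ∈ xs'.filter (fun x => decide (p < x)) := by
          rw [← hgt]; exact hGperm.mem_iff.mp hx
        exact of_decide_eq_true (List.mem_filter.mp hx').2
      have hpart : (lt ++ (eqL ++ gt)).Perm xs' := by
        rw [List.perm_iff_count]
        intro b
        simp only [List.count_append, hlt, heqL, hgt]
        rcases lt_trichotomy b p with h | h | h
        · rw [List.count_filter (by simpa using h),
            pv_count_filter_neg _ _ _ (by simp; omega),
            pv_count_filter_neg _ _ _ (by simp; omega)]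
          omega
        · subst h
          rw [pv_count_filter_neg _ _ _ (by simp),
            List.count_filter (by simp),
            pv_count_filter_neg _ _ _ (by simp)]
          omega
        · rw [pv_count_filter_neg _ _ _ (by simp; omega),
            pv_count_filter_neg _ _ _ (by simp; omega),
            List.count_filter (by simpa using h)]
          omega
      have hperm2 : (L ++ (eqL ++ G)).Perm s :=
        ((hLperm.append ((List.Perm.refl eqL).append hGperm)).trans hpart).trans hperm.symm
      have hEsort : eqL.Pairwise (fun x1 x2 : Int => x1 ≤ x2) := by
        apply List.pairwise_iff_getElem.mpr
        intro i j hi hj hij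
        rw [hmemE _ (List.getElem_mem _), hmemE _ (List.getElem_mem _)]
      have hsort2 : (L ++ (eqL ++ G)).Pairwise (· ≤ ·) := by
        rw [List.pairwise_append]
        refine ⟨hLsort, ?_, ?_⟩
        · rw [List.pairwise_append]
          refine ⟨hEsort, hGsort, ?_⟩
          · intro x hx y hy
            rw [hmemE x hx]; exact le_of_lt (hmemG y hy)
        · intro x hx y hy
          have hxp : x < p := hmemL x hx
          rcases List.mem_append.mp hy with h | h
          · rw [hmemE y h]; exact le_of_lt hxp
          · exact le_of_lt (lt_trans hxp (hmemG y h))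
      have hdecomp : s = L ++ (eqL ++ G) :=
        (hperm2.eq_of_pairwise' hsort2 hsort).symm
      have hltxs : lt.length < xs'.length :=
        pv_filter_length_lt _ _ _ (pv_pivot_mem xs' (by simp [hxs'])) (by rw [hp]; simp)
      have hgtxs : gt.length < xs'.length :=
        pv_filter_length_lt _ _ _ (pv_pivot_mem xs' (by simp [hxs'])) (by rw [hp]; simp)
      have hNxs : xs'.length ≤ N + 1 := hN
      have hstot : s.length = L.length + (eqL.length + G.length) := by
        rw [hdecomp]; simp
      by_cases h1 : k < (lt.length : Int)
      · rw [if_pos h1]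
        rw [ih lt (by omega) k L hLperm hLsort hk0 (by rw [hLlen]; exact_mod_cast h1)]
        rw [hdecomp, List.getD_append _ _ _ _ (by rw [hLlen]; omega)]
      · rw [if_neg h1]
        by_cases h2 : k < (lt.length : Int) + (eqL.length : Int)
        · rw [if_pos h2]
          rw [hdecomp,
            List.getD_append_right _ _ _ _ (by rw [hLlen]; omega),
            List.getD_append _ _ _ _ (by rw [hLlen]; omega)]
          rw [List.getD_eq_getElem _ _ (by rw [hLlen]; omega)]
          exact (hmemE _ (List.getElem_mem _)).symm
        · rw [if_neg h2]
          rw [ih gt (by omega) (k - lt.length - eqL.length) G hGperm hGsort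
            (by omega) (by rw [hGlen]; omega)]
          rw [hdecomp,
            List.getD_append_right _ _ _ _ (by rw [hLlen]; omega),
            List.getD_append_right _ _ _ _ (by rw [hLlen]; omega)]
          congr 1
          rw [hLlen]
          omega

-- characterisation of A's loop: after c more iterations starting at j with left = j,
-- right = len - 1 - j, the sums picked up are contiguous chunks of s and s.reverse
theorem pvLoopA_spec (s : List Int) (m : Int) (hm : m ≤ (s.length : Int)) :
    ∀ (c : Nat) (j mn mx : Int), 0 ≤ j → j + c = m →
    pvLoopA s m j j ((s.length : Int) - 1 - j) mn mx
      = (mx + ((s.reverse.drop j.toNat).take c).sum) - (mn + ((s.drop j.toNat).take c).sum) := by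
  intro c
  induction c with
  | zero =>
    intro j mn mx hj0 hjc
    rw [pvLoopA]
    have hnot : ¬ j < m := by omega
    simp [hnot]
  | succ c ih =>
    intro j mn mx hj0 hjc
    have hjm : j < m := by omega
    have hjlen : j.toNat < s.length := by omega
    rw [pvLoopA]
    rw [dif_pos hjm]
    have hget1 : PySem.List.pyGetD s j 0 = s[j.toNat] :=
      PySem.List.pyGetD_eq_getElem s 0 hj0 (by omega)
    have hget2 : PySem.List.pyGetD s ((s.length : Int) - 1 - j) 0
        = s.reverse[j.toNat]'(by simpa using hjlen) := by
      rw [PySem.List.pyGetD_eq_getElem s 0 (by omega) (by omega)]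
      rw [List.getElem_reverse]
      congr 1
      omega
    rw [hget1, hget2]
    have harg : (s.length : Int) - 1 - j - 1 = (s.length : Int) - 1 - (j + 1) := by ring
    rw [harg]
    rw [ih (j + 1) _ _ (by omega) (by omega)]
    have hj1 : (j + 1).toNat = j.toNat + 1 := by omega
    have hrev : (s.reverse.drop j.toNat).take (c + 1)
        = s.reverse[j.toNat]'(by simpa using hjlen) :: ((s.reverse.drop (j.toNat + 1)).take c) := by
      rw [List.drop_eq_getElem_cons (by simpa using hjlen), List.take_succ_cons]
    have hfwd : (s.drop j.toNat).take (c + 1)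
        = s[j.toNat] :: ((s.drop (j.toNat + 1)).take c) := by
      rw [List.drop_eq_getElem_cons hjlen, List.take_succ_cons]
    rw [hj1, hrev, hfwd]
    simp only [List.sum_cons]
    ring

-- sum of the first mm elements of a sorted list, via the threshold t = s[mm-1]
theorem pv_take_sum (s : List Int) (hs : s.Pairwise (· ≤ ·)) (mm : Nat)
    (hm1 : 1 ≤ mm) (hm2 : mm ≤ s.length) :
    (s.take mm).sum
      = (s.filter (fun x => x < s.getD (mm - 1) 0)).sum
        + s.getD (mm - 1) 0 * ((mm : Int) - (s.filter (fun x => x < s.getD (mm - 1) 0)).length) := by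
  set t : Int := s.getD (mm - 1) 0 with ht
  have htg : t = s[mm - 1]'(by omega) := by rw [ht, List.getD_eq_getElem _ _ (by omega)]
  have hfa : s.filter (fun x => x < t) = (s.take mm).filter (fun x => x < t) := by
    conv_lhs => rw [← List.take_append_drop mm s]
    rw [List.filter_append]
    have hnil : (s.drop mm).filter (fun x => x < t) = [] := by
      rw [List.filter_eq_nil_iff]
      intro x hx
      rcases List.mem_iff_getElem.mp hx with ⟨i, hi, hxi⟩
      rw [List.getElem_drop] at hxi
      have : t ≤ x := by
        rw [htg, ← hxi]
        exact pv_mono s hs (mm - 1) (mm + i) (by omega) (by simp at hi; omega)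
      simp; omega
    rw [hnil, List.append_nil]
  have hle : ∀ x ∈ s.take mm, x ≤ t := by
    intro x hx
    rcases List.mem_iff_getElem.mp hx with ⟨i, hi, hxi⟩
    rw [List.getElem_take] at hxi
    rw [htg, ← hxi]
    exact pv_mono s hs i (mm - 1) (by simp at hi; omega) (by omega)
  have hsplit := pv_sum_filter_split (fun x => decide (x < t)) (s.take mm)
  have hconst : ((s.take mm).filter (fun x => !decide (x < t))).sum
      = (((s.take mm).filter (fun x => !decide (x < t))).length : Int) * t := by
    apply pv_sum_const
    intro x hx
    have h1 := (List.mem_filter.mp hx).2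
    have h2 := hle x (List.mem_filter.mp hx).1
    simp at h1
    omega
  have hlen := List.length_eq_length_filter_add (l := s.take mm) (fun x => decide (x < t))
  have hlentake : (s.take mm).length = mm := by simp; omega
  rw [hfa]
  have hflen : ((s.take mm).filter (fun x => !decide (x < t))).length
      = mm - ((s.take mm).filter (fun x => decide (x < t))).length := by omega
  have hle2 : ((s.take mm).filter (fun x => decide (x < t))).length ≤ mm := by omega
  rw [← hsplit, hconst, hflen]
  push_cast [Nat.cast_sub hle2]
  ring

-- sum of the last mm elements of a sorted list, via the threshold t = s[n-mm]
theorem pv_drop_sum (s : List Int) (hs : s.Pairwise (· ≤ ·)) (mm : Nat)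
    (hm1 : 1 ≤ mm) (hm2 : mm ≤ s.length) :
    (s.drop (s.length - mm)).sum
      = (s.filter (fun x => s.getD (s.length - mm) 0 < x)).sum
        + s.getD (s.length - mm) 0 * ((mm : Int) - (s.filter (fun x => s.getD (s.length - mm) 0 < x)).length) := by
  set t : Int := s.getD (s.length - mm) 0 with ht
  have htg : t = s[s.length - mm]'(by omega) := by rw [ht, List.getD_eq_getElem _ _ (by omega)]
  have hfa : s.filter (fun x => t < x) = (s.drop (s.length - mm)).filter (fun x => t < x) := by
    conv_lhs => rw [← List.take_append_drop (s.length - mm) s]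
    rw [List.filter_append]
    have hnil : (s.take (s.length - mm)).filter (fun x => t < x) = [] := by
      rw [List.filter_eq_nil_iff]
      intro x hx
      rcases List.mem_iff_getElem.mp hx with ⟨i, hi, hxi⟩
      rw [List.getElem_take] at hxi
      have : x ≤ t := by
        rw [htg, ← hxi]
        exact pv_mono s hs i (s.length - mm) (by simp at hi; omega) (by omega)
      simp; omega
    rw [hnil, List.nil_append]
  have hge : ∀ x ∈ s.drop (s.length - mm), t ≤ x := by
    intro x hx
    rcases List.mem_iff_getElem.mp hx with ⟨i, hi, hxi⟩
    rw [List.getElem_drop] at hxi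
    rw [htg, ← hxi]
    exact pv_mono s hs (s.length - mm) (s.length - mm + i) (by omega) (by simp at hi; omega)
  have hsplit := pv_sum_filter_split (fun x => decide (t < x)) (s.drop (s.length - mm))
  have hconst : ((s.drop (s.length - mm)).filter (fun x => !decide (t < x))).sum
      = (((s.drop (s.length - mm)).filter (fun x => !decide (t < x))).length : Int) * t := by
    apply pv_sum_const
    intro x hx
    have h1 := (List.mem_filter.mp hx).2
    have h2 := hge x (List.mem_filter.mp hx).1
    simp at h1
    omega
  have hlen := List.length_eq_length_filter_add (l := s.drop (s.length - mm)) (fun x => decide (t < x))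
  have hlendrop : (s.drop (s.length - mm)).length = mm := by simp; omega
  rw [hfa]
  have hflen : ((s.drop (s.length - mm)).filter (fun x => !decide (t < x))).length
      = mm - ((s.drop (s.length - mm)).filter (fun x => decide (t < x))).length := by omega
  have hle2 : ((s.drop (s.length - mm)).filter (fun x => decide (t < x))).length ≤ mm := by omega
  rw [← hsplit, hconst, hflen]
  push_cast [Nat.cast_sub hle2]
  ring

-- ===== VERDICT (by name: the statement is the Claim_ definition above) =====
theorem MaxDiffBetween2SubsetsOfMElements_spec : Claim_equal_MaxDiffBetween2SubsetsOfMElements := by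
  intro ary m _hdom hpre
  unfold Spec_MaxDiffBetween2SubsetsOfMElements
  simp only [MaxDiffBetween2SubsetsOfMElements, MaxDiffBetween2SubsetsOfMElements_alt]
  set s : List Int := PySem.List.sorted ary (fun x => x) false with hsdef
  have hslen : s.length = ary.length := PySem.List.length_sorted ary (fun x => x) false
  have hsperm : s.Perm ary := PySem.List.sorted_perm ary (fun x => x) false
  have hssort : s.Pairwise (· ≤ ·) := by
    have := PySem.List.sorted_pairwise (xs := ary) (key := fun x : Int => x)
    simpa using this
  have hpre' : m ≤ (ary.length : Int) := hpre
  by_cases hm : m ≤ 0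
  · rw [pvLoopA]
    have hnot : ¬ (0 : Int) < m := by omega
    simp [hnot, hm]
  · rw [if_neg hm]
    have hm' : 0 < m := by omega
    set mm : Nat := m.toNat with hmm
    have hmmm : (mm : Int) = m := by omega
    have hmm1 : 1 ≤ mm := by omega
    have hmm2 : mm ≤ s.length := by omega
    have hA := pvLoopA_spec s m (by omega) mm 0 0 0 (le_refl 0) (by omega)
    simp only [Int.toNat_zero, List.drop_zero] at hA
    have hAlen : ((ary.length : Int) - 1) = ((s.length : Int) - 1 - 0) := by rw [hslen]; ring
    rw [hAlen, hA]
    have hlo : pvKth ary (m - 1) = s.getD (mm - 1) 0 := by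
      rw [pvKth_spec ary.length ary (le_refl _) (m - 1) s hsperm hssort (by omega)
        (by rw [hslen]; omega)]
      congr 1
      omega
    have hhi : pvKth ary ((ary.length : Int) - m) = s.getD (s.length - mm) 0 := by
      rw [pvKth_spec ary.length ary (le_refl _) ((ary.length : Int) - m) s hsperm hssort
        (by omega) (by rw [hslen]; omega)]
      congr 1
      omega
    rw [hlo, hhi]
    have hbelow : (ary.filter (fun x => x < s.getD (mm - 1) 0)).Perm
        (s.filter (fun x => x < s.getD (mm - 1) 0)) := (hsperm.filter _).symm
    have habove : (ary.filter (fun x => s.getD (s.length - mm) 0 < x)).Perm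
        (s.filter (fun x => s.getD (s.length - mm) 0 < x)) := (hsperm.filter _).symm
    rw [hbelow.sum_eq, hbelow.length_eq, habove.sum_eq, habove.length_eq]
    rw [← hmmm]
    rw [← pv_take_sum s hssort mm hmm1 hmm2, ← pv_drop_sum s hssort mm hmm1 hmm2]
    have hrevsum : ((s.reverse.take mm).sum) = (s.drop (s.length - mm)).sum := by
      rw [List.take_reverse]; exact List.sum_reverse _
    rw [hrevsum]
    ring
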